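-- pv_equiv track=rewrite | github.com/Jrmelo317/HashExtens-vel | Trabalho2/EntregaTrabalho2/geral.py | gerar_endereco
-- ===== SOURCE A (Python) =====
-- def gerar_endereco(chave: int, profundidade: int) -> int:
--     """
--     Essa função cria uma mascara e um retorno, cada fez que o loop ocorre ela abre um espaço ao final de retorno, pega o menor bit
--     da chave usando o operador & e a mascara, e adiciona a retorno no espaço aberto anteriormente usando o operador |, depois disso
--     joga o ultimo bit da chave fora, e repete o processo
--     """
--     val_ret = 0
--     mascara = 1
--     val_hash = chave
--
--     for i in range(profundidade):
--         val_ret = val_ret << 1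
--         bit_baixa_ordem = val_hash & mascara
--         val_ret = val_ret | bit_baixa_ordem
--         val_hash = val_hash >> 1
--
--     return val_ret
-- ===== SOURCE B (Python) =====
-- def gerar_endereco(chave: int, profundidade: int) -> int:
--     if profundidade <= 0:
--         return 0
--     m = chave % (1 << profundidade)
--     return int(format(m, '0{}b'.format(profundidade))[::-1], 2)
-- ===== Notes on version B (the rewrite author's own statement) =====
-- stated objective: idiomatic
-- what changed: Replaces the shift/mask accumulator loop by masking the low bits once, formatting them as a zero-padded binary string, reversing the string and parsing it back with int(s, 2).
import Mathlib
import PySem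

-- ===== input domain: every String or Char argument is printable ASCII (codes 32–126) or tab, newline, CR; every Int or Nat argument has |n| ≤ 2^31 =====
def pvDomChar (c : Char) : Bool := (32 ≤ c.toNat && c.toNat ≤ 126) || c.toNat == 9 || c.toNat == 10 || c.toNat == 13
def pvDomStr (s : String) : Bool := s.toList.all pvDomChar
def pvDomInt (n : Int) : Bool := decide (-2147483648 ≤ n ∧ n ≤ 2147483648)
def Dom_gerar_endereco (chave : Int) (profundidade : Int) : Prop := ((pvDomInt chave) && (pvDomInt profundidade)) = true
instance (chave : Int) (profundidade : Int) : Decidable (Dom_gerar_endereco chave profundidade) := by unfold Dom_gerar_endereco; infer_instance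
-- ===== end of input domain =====

-- B reverses the lowest `profundidade` bits of `chave` via a zero-padded binary
-- string that is reversed and parsed back, instead of A's shift/mask accumulator loop.

-- ===== PORT A =====
-- the body of A's for-loop, acting on the state (val_ret, val_hash)
def gerar_endereco_loop (st : Int × Int) : Int × Int :=
  let val_ret := st.1 <<< (1 : Nat)
  let bit_baixa_ordem := PySem.Int.band st.2 1
  (PySem.Int.bor val_ret bit_baixa_ordem, st.2 >>> (1 : Nat))

def gerar_endereco (chave : Int) (profundidade : Int) : Int :=
  ((PySem.List.pyRange 0 profundidade 1).foldl
    (fun st _ => gerar_endereco_loop st) (0, chave)).1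

-- ===== PORT B =====
-- binary digits of a positive Nat, most significant first (the recursive core of format(m, 'b'))
def binCore (n : Nat) : List Char :=
  if n = 0 then []
  else binCore (n / 2) ++ [if n % 2 = 1 then '1' else '0']
termination_by n
decreasing_by omega

-- format(n, 'b') for a nonnegative int (Python prints '0' for 0)
def binFmt (n : Nat) : List Char := if n = 0 then ['0'] else binCore n

def gerar_endereco_alt (chave : Int) (profundidade : Int) : Int :=
  if profundidade ≤ 0 then 0
  else
    let m := PySem.Int.mod chave ((1 : Int) <<< profundidade.toNat)
    -- format(m, '0{profundidade}b'): binFmt left-padded with '0' to profundidade digits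
    let s := List.replicate (profundidade.toNat - (binFmt m.toNat).length) '0' ++ binFmt m.toNat
    -- int(s[::-1], 2): exact for the nonempty '0'/'1'-digit strings format produces here
    s.reverse.foldl (fun a c => 2 * a + (if c = '1' then 1 else 0)) 0

-- ===== PRECONDITION & SPEC =====
def Spec_gerar_endereco (chave : Int) (profundidade : Int) (out : Int) : Prop := out = gerar_endereco_alt chave profundidade
instance (chave : Int) (profundidade : Int) (out : Int) : Decidable (Spec_gerar_endereco chave profundidade out) := by unfold Spec_gerar_endereco; infer_instance

-- ===== CLAIM (what is proved, stated in full; the proofs are below) =====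
def Claim_equal_gerar_endereco : Prop := ∀ (chave : Int) (profundidade : Int), Dom_gerar_endereco chave profundidade → Spec_gerar_endereco chave profundidade (gerar_endereco chave profundidade)

-- ===== LEMMAS AND PROOFS =====

-- the common mathematical value: the lowest n bits of c, reversed
def revLow : Nat → Int → Int
  | 0, _ => 0
  | n + 1, c => c % 2 * 2 ^ n + revLow n (c / 2)

-- proof-side mirror of the padded binary string: the lowest n bits of m, MSB first
def bitsChars : Nat → Nat → List Char
  | 0, _ => []
  | n + 1, m => bitsChars n (m / 2) ++ [if m % 2 = 1 then '1' else '0']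

theorem foldl_const_iterate (f : Int × Int → Int × Int) (init : Int × Int) (l : List Int) :
    List.foldl (fun s _ => f s) init l = f^[l.length] init := by
  induction l generalizing init <;> simp_all [Function.iterate_succ_apply]

theorem or_two_mul_add (a b : Nat) (hb : b < 2) : 2 * a ||| b = 2 * a + b := by
  interval_cases b
  · simp
  · have h := Nat.lor_bit false a true 0
    simpa [Nat.bit, Nat.lor_comm] using h

theorem loop_step (r h : Int) (hr : 0 ≤ r) :
    gerar_endereco_loop (r, h) = (2 * r + h % 2, h / 2) := by
  unfold gerar_endereco_loop
  have h1 : r <<< (1 : Nat) = 2 * r := by simp [Int.shiftLeft_eq]; ring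
  have h2 : PySem.Int.band h 1 = h % 2 := by
    rw [PySem.Int.band_one, PySem.Int.mod_eq_emod_of_pos (by norm_num)]
  have h3 : h >>> (1 : Nat) = h / 2 := by simp [Int.shiftRight_eq_div_pow]
  have hm : h % 2 = 0 ∨ h % 2 = 1 := by omega
  simp only [h1, h2, h3]
  congr 1
  rcases hm with hm | hm
  · simp [hm]
  · rw [hm, PySem.Int.bor_of_nonneg (by omega) (by omega)]
    have : (2 * r).toNat = 2 * r.toNat := by omega
    rw [this, or_two_mul_add _ _ (by norm_num)]
    omega

theorem loop_iterate (n : Nat) (r h : Int) (hr : 0 ≤ r) :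
    gerar_endereco_loop^[n] (r, h) = (r * 2 ^ n + revLow n h, h / 2 ^ n) := by
  induction n generalizing r h with
  | zero => simp [revLow]
  | succ n ih =>
    rw [Function.iterate_succ_apply, loop_step r h hr,
      ih (2 * r + h % 2) (h / 2) (by omega)]
    have hdd : h / 2 / 2 ^ n = h / 2 ^ (n + 1) := by
      rw [pow_succ', ← Int.ediv_ediv_of_nonneg (by norm_num)]
    rw [hdd, revLow]
    ring_nf

theorem emod_pow_div (c : Int) (n : Nat) : (c % 2 ^ (n + 1)) / 2 = (c / 2) % 2 ^ n := by
  have h1 : c / (2 * 2 ^ n) = c / 2 / 2 ^ n := (Int.ediv_ediv_of_nonneg (by norm_num)).symm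
  have h2 : c % (2 * 2 ^ n) = c - 2 * 2 ^ n * (c / (2 * 2 ^ n)) := by rw [Int.emod_def]
  have h3 : (c - 2 * 2 ^ n * (c / 2 / 2 ^ n)) / 2 = c / 2 - 2 ^ n * (c / 2 / 2 ^ n) := by
    rw [show c - 2 * 2 ^ n * (c / 2 / 2 ^ n) = c + (-(2 ^ n * (c / 2 / 2 ^ n))) * 2 by ring,
      Int.add_mul_ediv_right _ _ (by norm_num)]
    ring
  rw [pow_succ'] at *
  rw [h2, h1, h3, Int.emod_def]

theorem revLow_emod (n : Nat) (c : Int) : revLow n (c % 2 ^ n) = revLow n c := by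
  induction n generalizing c with
  | zero => simp [revLow]
  | succ n ih =>
    rw [revLow, revLow, Int.emod_emod_of_dvd c (dvd_pow_self 2 (Nat.succ_ne_zero n)),
      emod_pow_div, ih]

theorem pad_eq_bitsChars (n : Nat) : 1 ≤ n → ∀ m : Nat, m < 2 ^ n →
    List.replicate (n - (binFmt m).length) '0' ++ binFmt m = bitsChars n m := by
  induction n with
  | zero => omega
  | succ n ih =>
    intro _ m hm
    by_cases hn : n = 0
    · subst hn
      interval_cases m <;> simp [binFmt, binCore, bitsChars]
    · have hn1 : 1 ≤ n := by omega
      by_cases h2 : m ≤ 1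
      · have hm2 : m / 2 = 0 := by omega
        have hfz : binFmt 0 = ['0'] := by simp [binFmt]
        have hd : binFmt m = [if m % 2 = 1 then '1' else '0'] := by
          interval_cases m <;> simp [binFmt, binCore]
        rw [bitsChars, hm2, ← ih hn1 0 (by positivity), hfz, hd]
        simp only [List.length_cons, List.length_nil, List.append_assoc, List.singleton_append]
        rw [show (List.replicate (n - (0 + 1)) '0' ++ '0' ::
              [if m % 2 = 1 then '1' else '0'] : List Char)
            = (List.replicate (n - 1) '0' ++ ['0']) ++ [if m % 2 = 1 then '1' else '0'] by
          simp]
        rw [← List.replicate_succ' (n := n - 1) (a := '0'), show n - 1 + 1 = n by omega,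
          show n + 1 - (0 + 1) = n by omega]
      · -- m ≥ 2
        have hm0 : m ≠ 0 := by omega
        have hq1 : m / 2 ≠ 0 := by omega
        have hstep : binFmt m = binFmt (m / 2) ++ [if m % 2 = 1 then '1' else '0'] := by
          rw [binFmt, if_neg hm0, binCore, if_neg hm0, binFmt, if_neg hq1]
        rw [bitsChars, ← ih hn1 (m / 2) (by omega), hstep]
        simp only [List.length_append, List.length_cons, List.length_nil, List.append_assoc]
        rw [show n + 1 - ((binFmt (m / 2)).length + (0 + 1)) = n - (binFmt (m / 2)).length by omega]

theorem parse_bitsChars (n : Nat) : ∀ (m : Nat) (acc : Int),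
    (bitsChars n m).reverse.foldl (fun a c => 2 * a + (if c = '1' then 1 else 0)) acc
      = acc * 2 ^ n + revLow n (m : Int) := by
  induction n with
  | zero => intro m acc; simp [bitsChars, revLow]
  | succ n ih =>
    intro m acc
    rw [bitsChars, List.reverse_append]
    simp only [List.reverse_cons, List.reverse_nil, List.nil_append, List.singleton_append,
      List.foldl_cons]
    rw [ih (m / 2) _]
    have hcast2 : ((m : Int)) % 2 = ((m % 2 : Nat) : Int) := by omega
    have hcastd : ((m : Int)) / 2 = ((m / 2 : Nat) : Int) := by omega
    rw [revLow, hcast2, hcastd]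
    rcases Nat.mod_two_eq_zero_or_one m with hm | hm <;> rw [hm] <;> simp <;> ring

theorem gerar_endereco_spec : Claim_equal_gerar_endereco := by
  intro chave profundidade _
  unfold Spec_gerar_endereco gerar_endereco gerar_endereco_alt
  by_cases hp : profundidade ≤ 0
  · rw [if_pos hp]
    have : PySem.List.pyRange 0 profundidade 1 = [] := by
      simp [PySem.List.pyRange]; omega
    simp [this]
  · rw [if_neg hp]
    have hp' : 0 < profundidade := by omega
    set N := profundidade.toNat with hN
    have hN1 : 1 ≤ N := by omega
    have hNp : (N : Int) = profundidade := by omega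
    -- A's side: the loop computes revLow N chave
    have hlen : (PySem.List.pyRange 0 profundidade 1).length = N := by
      rw [← hNp, PySem.List.pyRange_zero_natCast]; simp
    have hA : ((PySem.List.pyRange 0 profundidade 1).foldl
        (fun st _ => gerar_endereco_loop st) (0, chave)).1 = revLow N chave := by
      rw [foldl_const_iterate gerar_endereco_loop (0, chave) _, hlen,
        loop_iterate N 0 chave le_rfl]
      simp
    -- B's side
    have hshift : (1 : Int) <<< N = 2 ^ N := by simp [Int.shiftLeft_eq]
    have hmod : PySem.Int.mod chave ((1 : Int) <<< N) = chave % 2 ^ N := by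
      rw [hshift, PySem.Int.mod_eq_emod_of_pos (by positivity)]
    have hm0 : (0 : Int) ≤ chave % 2 ^ N := Int.emod_nonneg chave (by positivity)
    have hmlt : chave % 2 ^ N < 2 ^ N := Int.emod_lt_of_pos chave (by positivity)
    set mN : Nat := (chave % 2 ^ N).toNat with hmN
    have hcast : ((mN : Nat) : Int) = chave % 2 ^ N := by omega
    have hmNlt : mN < 2 ^ N := by
      have h2c : ((2 ^ N : Nat) : Int) = (2 : Int) ^ N := by push_cast; ring
      omega
    show _ = List.foldl _ 0 (List.replicate (N - (binFmt (PySem.Int.mod chave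
        ((1 : Int) <<< N)).toNat).length) '0' ++ binFmt (PySem.Int.mod chave
        ((1 : Int) <<< N)).toNat).reverse
    rw [hmod, ← hmN, pad_eq_bitsChars N hN1 mN hmNlt, parse_bitsChars N mN 0]
    rw [hA, zero_mul, zero_add, hcast, revLow_emod]
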